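-- pv_equiv track=rewrite | github.com/timwong101/cmsc498p-project | gam_package/medoids_algorithms/ranked_medoids.py | checkClustersContainDifferent
-- ===== SOURCE A (Python) =====
-- def checkClustersContainDifferent(clusters):
--     for i in range(len(clusters)):
--         for d in clusters[i]:
--             for j in range(len(clusters)):
--                 if i != j:
--                     if d in clusters[j]:
--                         return False
--     return True
-- ===== SOURCE B (Python) =====
-- def checkClustersContainDifferent(clusters):
--     owner = {}
--     for i, cluster in enumerate(clusters):
--         for d in cluster:
--             j = owner.setdefault(d, i)
--             if j != i:
--                 return False
--     return True
-- ===== Notes on version B (the rewrite author's own statement) =====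
-- stated objective: alternative
-- what changed: Replaced the triple nested scan (for each element of each cluster, scan every other cluster) by a single pass that maintains a first-owner dict mapping each element to the index of the cluster that first contained it, failing as soon as an element's recorded owner differs from the current cluster.
import Mathlib
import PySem

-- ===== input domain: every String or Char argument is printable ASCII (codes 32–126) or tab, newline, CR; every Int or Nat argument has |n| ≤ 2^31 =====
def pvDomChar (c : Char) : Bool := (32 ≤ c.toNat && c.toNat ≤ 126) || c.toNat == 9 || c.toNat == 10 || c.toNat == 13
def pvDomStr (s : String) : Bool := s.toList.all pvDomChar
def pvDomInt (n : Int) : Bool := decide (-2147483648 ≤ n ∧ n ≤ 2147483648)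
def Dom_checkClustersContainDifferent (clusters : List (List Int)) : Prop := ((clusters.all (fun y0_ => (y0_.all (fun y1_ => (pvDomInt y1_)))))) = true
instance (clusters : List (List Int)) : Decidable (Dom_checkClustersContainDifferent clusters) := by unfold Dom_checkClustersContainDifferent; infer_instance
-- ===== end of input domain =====

-- B replaces A's triple nested scan by one pass that records each element's first-owning
-- cluster index in a dict and fails when an element reappears under a different index (alternative algorithm).

-- ===== PORT A =====
-- A: for i in range(len): for d in clusters[i]: for j in range(len): if i != j and d in clusters[j]: return False
-- the early 'return False' is the short-circuit of .all over the same index ranges, same order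
def checkClustersContainDifferent (clusters : List (List Int)) : Bool :=
  (List.range clusters.length).all fun i =>
    (clusters.getD i []).all fun d =>
      (List.range clusters.length).all fun j =>
        !(decide (i ≠ j) && (clusters.getD j []).contains d)

-- ===== PORT B =====
-- inner loop of B: j = owner.setdefault(d, i); if j != i: return False
-- (setdefault transliterated: if key present keep its value, else insert i); none = early False
def pvAltInner (i : Int) : PySem.Dict Int Int → List Int → Option (PySem.Dict Int Int)
  | owner, [] => some owner
  | owner, d :: ds =>
    match owner.get? d with
    | some j => if j ≠ i then none else pvAltInner i owner ds
    | none => pvAltInner i (owner.insert d i) ds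

-- outer loop of B: for i, cluster in enumerate(clusters)
def pvAltGo : Int → PySem.Dict Int Int → List (List Int) → Bool
  | _, _, [] => true
  | i, owner, c :: cs =>
    match pvAltInner i owner c with
    | none => false
    | some owner' => pvAltGo (i + 1) owner' cs

def checkClustersContainDifferent_alt (clusters : List (List Int)) : Bool :=
  pvAltGo 0 PySem.Dict.empty clusters

-- ===== PRECONDITION & SPEC =====
def Spec_checkClustersContainDifferent (clusters : List (List Int)) (out : Bool) : Prop := out = checkClustersContainDifferent_alt clusters
instance (clusters : List (List Int)) (out : Bool) : Decidable (Spec_checkClustersContainDifferent clusters out) := by unfold Spec_checkClustersContainDifferent; infer_instance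

-- ===== CLAIM (what is proved, stated in full; the proofs are below) =====
def Claim_equal_checkClustersContainDifferent : Prop := ∀ (clusters : List (List Int)), Dom_checkClustersContainDifferent clusters → Spec_checkClustersContainDifferent clusters (checkClustersContainDifferent clusters)

-- ===== LEMMAS AND PROOFS =====

-- prefix-disjointness: each cluster avoids K and all earlier clusters
def pvPD (K : Int → Prop) : List (List Int) → Prop
  | [] => True
  | c :: cs => (∀ d ∈ c, ¬ K d) ∧ pvPD (fun x => K x ∨ x ∈ c) cs

theorem pvPD_congr (cs : List (List Int)) (K K' : Int → Prop) (h : ∀ x, K x ↔ K' x) :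
    pvPD K cs ↔ pvPD K' cs := by
  induction cs generalizing K K' with
  | nil => simp [pvPD]
  | cons c cs ih =>
    simp only [pvPD]
    constructor
    · rintro ⟨h1, h2⟩
      exact ⟨fun d hd => (h d).not.mp (h1 d hd), (ih _ _ (fun x => by rw [h x])).mp h2⟩
    · rintro ⟨h1, h2⟩
      exact ⟨fun d hd => (h d).not.mpr (h1 d hd), (ih _ _ (fun x => by rw [h x])).mpr h2⟩

theorem pvAltInner_none_iff (i : Int) (c : List Int) :
    ∀ owner : PySem.Dict Int Int,
      (pvAltInner i owner c = none ↔ ∃ d ∈ c, ∃ j, owner.get? d = some j ∧ j ≠ i) := by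
  induction c with
  | nil => intro owner; simp [pvAltInner]
  | cons d ds ih =>
    intro owner
    simp only [pvAltInner]
    cases h : owner.get? d with
    | none =>
      dsimp only
      rw [ih]
      constructor
      · rintro ⟨x, hx, j, hj, hji⟩
        rw [PySem.Dict.get?_insert] at hj
        by_cases hxd : x = d
        · rw [if_pos hxd] at hj
          exact (hji (Option.some.inj hj).symm).elim
        · rw [if_neg hxd] at hj
          exact ⟨x, List.mem_cons_of_mem _ hx, j, hj, hji⟩
      · rintro ⟨x, hx, j, hj, hji⟩
        rcases List.mem_cons.mp hx with rfl | hx'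
        · rw [h] at hj; exact absurd hj (by simp)
        · by_cases hxd : x = d
          · subst hxd; rw [h] at hj; exact absurd hj (by simp)
          · exact ⟨x, hx', j, by rw [PySem.Dict.get?_insert, if_neg hxd]; exact hj, hji⟩
    | some j =>
      dsimp only
      by_cases hji : j = i
      · subst hji
        rw [if_neg (by simp)]
        rw [ih]
        constructor
        · rintro ⟨x, hx, j', hj', hj'i⟩
          exact ⟨x, List.mem_cons_of_mem _ hx, j', hj', hj'i⟩
        · rintro ⟨x, hx, j', hj', hj'i⟩
          rcases List.mem_cons.mp hx with rfl | hx'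
          · rw [h] at hj'; exact absurd (Option.some.inj hj').symm hj'i
          · exact ⟨x, hx', j', hj', hj'i⟩
      · rw [if_pos hji]
        simp only [true_iff]
        exact ⟨d, List.mem_cons_self, j, h, hji⟩

theorem pvAltInner_some (i : Int) (c : List Int) :
    ∀ owner owner' : PySem.Dict Int Int, pvAltInner i owner c = some owner' →
      ∀ x, ((owner'.get? x).isSome ↔ x ∈ c ∨ (owner.get? x).isSome) ∧
        (∀ j, owner'.get? x = some j → j = i ∨ owner.get? x = some j) := by
  induction c with
  | nil =>
    intro owner owner' h x
    simp only [pvAltInner, Option.some.injEq] at h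
    subst h
    exact ⟨by simp, fun j hj => Or.inr hj⟩
  | cons d ds ih =>
    intro owner owner' h x
    simp only [pvAltInner] at h
    cases hg : owner.get? d with
    | none =>
      rw [hg] at h
      dsimp only at h
      have := ih _ _ h x
      by_cases hxd : x = d
      · subst hxd
        constructor
        · rw [this.1]
          simp
        · intro j hj
          rcases this.2 j hj with hji | hins
          · exact Or.inl hji
          · rw [PySem.Dict.get?_insert, if_pos rfl] at hins
            exact Or.inl (Option.some.inj hins).symm
      · constructor
        · rw [this.1, PySem.Dict.get?_insert, if_neg hxd]
          constructor
          · rintro (hx | hs)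
            · exact Or.inl (List.mem_cons_of_mem _ hx)
            · exact Or.inr hs
          · rintro (hx | hs)
            · rcases List.mem_cons.mp hx with rfl | hx'
              · exact absurd rfl hxd
              · exact Or.inl hx'
            · exact Or.inr hs
        · intro j hj
          rcases this.2 j hj with hji | hins
          · exact Or.inl hji
          · rw [PySem.Dict.get?_insert, if_neg hxd] at hins
            exact Or.inr hins
    | some j =>
      rw [hg] at h
      dsimp only at h
      by_cases hji : j = i
      · rw [if_neg (by simp [hji])] at h
        have := ih _ _ h x
        constructor
        · rw [this.1]
          constructor
          · rintro (hx | hs)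
            · exact Or.inl (List.mem_cons_of_mem _ hx)
            · exact Or.inr hs
          · rintro (hx | hs)
            · rcases List.mem_cons.mp hx with rfl | hx'
              · exact Or.inr (by simp [hg])
              · exact Or.inl hx'
            · exact Or.inr hs
        · exact this.2
      · rw [if_pos hji] at h
        exact absurd h (by simp)

theorem pvAltGo_iff (cs : List (List Int)) :
    ∀ (i : Int) (owner : PySem.Dict Int Int),
      (∀ x j, owner.get? x = some j → j < i) →
      (pvAltGo i owner cs = true ↔ pvPD (fun x => (owner.get? x).isSome = true) cs) := by
  induction cs with
  | nil => intro i owner _; simp [pvAltGo, pvPD]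
  | cons c cs ih =>
    intro i owner hlt
    simp only [pvAltGo, pvPD]
    cases h : pvAltInner i owner c with
    | none =>
      simp only [Bool.false_eq_true, false_iff]
      rintro ⟨h1, _⟩
      rcases (pvAltInner_none_iff i c owner).mp h with ⟨d, hd, j, hj, _⟩
      exact h1 d hd (by simp [hj])
    | some owner' =>
      have hsome := pvAltInner_some i c owner owner' h
      have hlt' : ∀ x j, owner'.get? x = some j → j < i + 1 := by
        intro x j hj
        rcases (hsome x).2 j hj with rfl | hold
        · omega
        · have := hlt x j hold; omega
      rw [ih (i + 1) owner' hlt']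
      have hnotnone : ¬ ∃ d ∈ c, ∃ j, owner.get? d = some j ∧ j ≠ i := by
        rw [← pvAltInner_none_iff]
        simp [h]
      have hfst : ∀ d ∈ c, ¬ ((owner.get? d).isSome = true) := by
        intro d hd hs
        rcases Option.isSome_iff_exists.mp hs with ⟨j, hj⟩
        exact hnotnone ⟨d, hd, j, hj, by have := hlt d j hj; omega⟩
      constructor
      · intro hpd
        refine ⟨hfst, ?_⟩
        refine (pvPD_congr cs _ _ ?_).mp hpd
        intro x
        rw [(hsome x).1]
        tauto
      · rintro ⟨_, hpd⟩
        refine (pvPD_congr cs _ _ ?_).mpr hpd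
        intro x
        rw [(hsome x).1]
        tauto

theorem pvAlt_iff (cs : List (List Int)) :
    checkClustersContainDifferent_alt cs = true ↔ pvPD (fun _ => False) cs := by
  unfold checkClustersContainDifferent_alt
  rw [pvAltGo_iff cs 0 PySem.Dict.empty (by intro x j hj; simp [PySem.Dict.get?_empty] at hj)]
  exact pvPD_congr cs _ _ (by intro x; simp [PySem.Dict.get?_empty])

theorem pvPD_false_iff (cs : List (List Int)) (K : Int → Prop) :
    pvPD K cs ↔ (∀ c ∈ cs, ∀ d ∈ c, ¬ K d) ∧ cs.Pairwise (fun a b => ∀ d ∈ a, d ∉ b) := by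
  induction cs generalizing K with
  | nil => simp [pvPD]
  | cons c cs ih =>
    simp only [pvPD, ih, List.mem_cons, List.pairwise_cons]
    constructor
    · rintro ⟨h1, h2, h3⟩
      refine ⟨?_, ?_, h3⟩
      · rintro c' (rfl | hc') d hd
        · exact h1 d hd
        · exact fun hK => h2 c' hc' d hd (Or.inl hK)
      · intro c' hc' d hd hdc'
        exact h2 c' hc' d hdc' (Or.inr hd)
    · rintro ⟨h1, h2, h3⟩
      refine ⟨h1 c (Or.inl rfl), ?_, h3⟩
      rintro c' hc' d hd (hK | hdc)
      · exact h1 c' (Or.inr hc') d hd hK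
      · exact h2 c' hc' d hdc hd

theorem pvA_iff (cs : List (List Int)) :
    checkClustersContainDifferent cs = true ↔
      ∀ i < cs.length, ∀ d ∈ cs.getD i [], ∀ j < cs.length, i ≠ j → d ∉ cs.getD j [] := by
  simp only [checkClustersContainDifferent, List.all_eq_true, List.mem_range, Bool.not_eq_true',
    Bool.and_eq_false_iff, decide_eq_false_iff_not, ne_eq, not_not, List.contains_eq_mem,
    decide_eq_false_iff_not]
  constructor
  · intro h i hi d hd j hj hij
    rcases h i hi d hd j hj with h' | h'
    · exact absurd h' hij
    · exact h'
  · intro h i hi d hd j hj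
    by_cases hij : i = j
    · exact Or.inl hij
    · exact Or.inr (h i hi d hd j hj hij)

theorem pv_main (cs : List (List Int)) :
    checkClustersContainDifferent cs = checkClustersContainDifferent_alt cs := by
  have hg : ∀ (k : ℕ) (hk : k < cs.length), cs.getD k [] = cs[k] := by
    intro k hk
    simp [List.getD, List.getElem?_eq_getElem hk]
  rw [Bool.eq_iff_iff, pvA_iff, pvAlt_iff, pvPD_false_iff]
  simp only [not_false_eq_true, implies_true, true_and]
  rw [List.pairwise_iff_getElem]
  constructor
  · intro h i j hi hj hij d hd hdj
    exact h i hi d (by rw [hg i hi]; exact hd) j hj (by omega) (by rw [hg j hj]; exact hdj)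
  · intro h i hi d hd j hj hij hdj
    rcases lt_trichotomy i j with hlt | heq | hgt
    · exact h i j hi hj hlt d (by rw [← hg i hi]; exact hd) (by rw [← hg j hj]; exact hdj)
    · exact hij heq
    · exact h j i hj hi hgt d (by rw [← hg j hj]; exact hdj) (by rw [← hg i hi]; exact hd)

-- ===== VERDICT (by name: the statement is the Claim_ definition above) =====
theorem checkClustersContainDifferent_spec : Claim_equal_checkClustersContainDifferent := by
  intro cs _
  unfold Spec_checkClustersContainDifferent
  exact pv_main cs
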